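-- pv_equiv track=rewrite | github.com/ShangwenWang/Cognac | dataextractor.py | completeInvocation
-- ===== SOURCE A (Python) =====
-- def completeInvocation(localImports, invocations, curClass, superclass, curMethods):
--     completedInv = set()
--     for x in invocations:
--         for y in localImports:
--             if x[0] != '' and y.endswith(x[0]):
--                 completedInv.add(y + '.' + x[1])
--             elif x[0] == '' and x[1] in curMethods:
--                 completedInv.add(curClass + '.' + x[1])
--             elif x[0] == '' and superclass is not None:
--                 completedInv.add(superclass + '.' + x[1])
--     return completedInv
-- ===== SOURCE B (Python) =====
-- def completeInvocation(localImports, invocations, curClass, superclass, curMethods):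
--     if not localImports:
--         return set()
--     matches = {}  # memo: prefix -> imports ending with that prefix (computed once per distinct prefix)
--     out = []
--     for prefix, name in invocations:
--         if prefix != '':
--             ms = matches.get(prefix)
--             if ms is None:
--                 ms = [imp for imp in localImports if imp.endswith(prefix)]
--                 matches[prefix] = ms
--             out.extend(imp + '.' + name for imp in ms)
--         elif name in curMethods:
--             out.append(curClass + '.' + name)
--         elif superclass is not None:
--             out.append(superclass + '.' + name)
--     return set(out)
-- ===== Notes on version B (the rewrite author's own statement) =====
-- stated objective: alternative
-- what changed: Replaces the uniform nested scan that re-decides every branch per import with a memoized index: a dict caches, once per distinct prefix, the list of imports ending with it; candidates are emitted into a flat list (empty-prefix invocations classified in O(1) without touching the imports) and deduplicated once at the end with set(), instead of conditional set-insertion inside the inner loop.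
import Mathlib
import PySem

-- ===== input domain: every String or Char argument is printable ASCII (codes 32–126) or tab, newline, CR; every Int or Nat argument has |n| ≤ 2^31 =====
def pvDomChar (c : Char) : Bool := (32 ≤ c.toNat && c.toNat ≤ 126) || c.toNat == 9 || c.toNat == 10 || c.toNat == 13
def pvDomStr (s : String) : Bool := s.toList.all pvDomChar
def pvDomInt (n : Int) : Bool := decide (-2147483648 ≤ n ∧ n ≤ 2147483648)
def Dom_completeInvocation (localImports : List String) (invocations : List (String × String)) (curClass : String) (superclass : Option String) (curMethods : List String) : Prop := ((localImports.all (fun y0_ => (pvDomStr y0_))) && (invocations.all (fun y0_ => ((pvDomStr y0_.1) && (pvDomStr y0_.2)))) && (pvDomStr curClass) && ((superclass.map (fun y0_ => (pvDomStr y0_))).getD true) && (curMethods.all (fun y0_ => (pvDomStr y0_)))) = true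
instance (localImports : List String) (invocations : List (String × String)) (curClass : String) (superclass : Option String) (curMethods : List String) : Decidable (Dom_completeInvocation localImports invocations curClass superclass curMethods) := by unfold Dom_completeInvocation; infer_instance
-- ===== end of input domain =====

-- B memoizes, per distinct prefix, the imports ending with it, emits candidates into a flat
-- list (classifying empty-prefix invocations without touching the imports) and deduplicates
-- once at the end, instead of A's conditional set-insertion inside a uniform nested loop
-- (objective: alternative).

-- ===== PORT A =====
def completeInvocation (localImports : List String) (invocations : List (String × String)) (curClass : String) (superclass : Option String) (curMethods : List String) : List String :=
  invocations.foldl (fun completedInv x =>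
    localImports.foldl (fun completedInv y =>
      if x.1 ≠ "" ∧ PySem.Str.endswith y x.1 then
        PySem.Set.add completedInv (y ++ "." ++ x.2)
      else if x.1 = "" ∧ x.2 ∈ curMethods then
        PySem.Set.add completedInv (curClass ++ "." ++ x.2)
      else if x.1 = "" ∧ superclass.isSome then
        PySem.Set.add completedInv (superclass.getD "" ++ "." ++ x.2)
      else completedInv) completedInv) PySem.Set.empty

-- ===== PORT B =====
-- per-invocation step of B's loop: memo cache of prefix matches × output list
def stepB (localImports : List String) (curClass : String) (superclass : Option String)
    (curMethods : List String) (st : PySem.Dict String (List String) × List String)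
    (x : String × String) : PySem.Dict String (List String) × List String :=
  if x.1 ≠ "" then
    match PySem.Dict.get? st.1 x.1 with
    | some ms => (st.1, st.2 ++ ms.map (fun imp => imp ++ "." ++ x.2))
    | none =>
      let ms := localImports.filter (fun imp => PySem.Str.endswith imp x.1)
      (PySem.Dict.insert st.1 x.1 ms, st.2 ++ ms.map (fun imp => imp ++ "." ++ x.2))
  else if x.2 ∈ curMethods then (st.1, st.2 ++ [curClass ++ "." ++ x.2])
  else match superclass with
    | some sup => (st.1, st.2 ++ [sup ++ "." ++ x.2])
    | none => st

def completeInvocation_alt (localImports : List String) (invocations : List (String × String)) (curClass : String) (superclass : Option String) (curMethods : List String) : List String :=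
  if localImports = [] then PySem.Set.empty
  else
    PySem.Set.ofList
      (invocations.foldl (stepB localImports curClass superclass curMethods)
        (PySem.Dict.empty, [])).2

-- ===== PRECONDITION & SPEC =====
def Spec_completeInvocation (localImports : List String) (invocations : List (String × String)) (curClass : String) (superclass : Option String) (curMethods : List String) (out : List String) : Prop := out = completeInvocation_alt localImports invocations curClass superclass curMethods
instance (localImports : List String) (invocations : List (String × String)) (curClass : String) (superclass : Option String) (curMethods : List String) (out : List String) : Decidable (Spec_completeInvocation localImports invocations curClass superclass curMethods out) := by unfold Spec_completeInvocation; infer_instance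

-- ===== CLAIM =====
def Claim_equal_completeInvocation : Prop := ∀ (localImports : List String) (invocations : List (String × String)) (curClass : String) (superclass : Option String) (curMethods : List String), Dom_completeInvocation localImports invocations curClass superclass curMethods → Spec_completeInvocation localImports invocations curClass superclass curMethods (completeInvocation localImports invocations curClass superclass curMethods)

-- ===== LEMMAS AND PROOFS =====

-- the candidate strings one invocation contributes (in A's first-occurrence order)
def cand (localImports : List String) (curClass : String) (superclass : Option String)
    (curMethods : List String) (x : String × String) : List String :=
  if x.1 ≠ "" then
    (localImports.filter (fun imp => PySem.Str.endswith imp x.1)).map (fun imp => imp ++ "." ++ x.2)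
  else if x.2 ∈ curMethods then [curClass ++ "." ++ x.2]
  else match superclass with
    | some sup => [sup ++ "." ++ x.2]
    | none => []

-- A's inner per-import step
def stepA (curClass : String) (superclass : Option String) (curMethods : List String)
    (x : String × String) (completedInv : PySem.Set String) (y : String) : PySem.Set String :=
  if x.1 ≠ "" ∧ PySem.Str.endswith y x.1 then
    PySem.Set.add completedInv (y ++ "." ++ x.2)
  else if x.1 = "" ∧ x.2 ∈ curMethods then
    PySem.Set.add completedInv (curClass ++ "." ++ x.2)
  else if x.1 = "" ∧ superclass.isSome then
    PySem.Set.add completedInv (superclass.getD "" ++ "." ++ x.2)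
  else completedInv

-- folding a step that always adds the same element over any list fixes the set after one add
theorem foldl_const_add {α β : Type} [BEq α] [LawfulBEq α] (f : PySem.Set α → β → PySem.Set α)
    (e : α) (hf : ∀ s y, f s y = PySem.Set.add s e) (s : PySem.Set α) (l : List β) :
    l.foldl f (PySem.Set.add s e) = PySem.Set.add s e := by
  induction l generalizing s with
  | nil => rfl
  | cons y ys ih =>
    simp only [List.foldl_cons, hf]
    rw [PySem.Set.add_of_mem (by simp [PySem.Set.mem_add])]
    exact ih s

-- with an empty prefix, an absent method and no superclass, A's inner step never adds
theorem inner_id (curClass : String) (curMethods : List String)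
    (x : String × String) (hx : x.1 = "") (hm : x.2 ∉ curMethods)
    (l : List String) (s : PySem.Set String) :
    l.foldl (stepA curClass none curMethods x) s = s := by
  induction l generalizing s with
  | nil => rfl
  | cons y ys ih =>
    simp only [List.foldl_cons, stepA]
    rw [if_neg (by simp [hx]), if_neg (by tauto), if_neg (by simp)]
    exact ih _

-- with a nonempty prefix, A's inner fold adds the filtered-and-mapped candidates in order
theorem inner_ne (curClass : String) (superclass : Option String) (curMethods : List String)
    (x : String × String) (hx : x.1 ≠ "") (l : List String) (s : PySem.Set String) :
    l.foldl (stepA curClass superclass curMethods x) s =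
    ((l.filter (fun imp => PySem.Str.endswith imp x.1)).map
      (fun imp => imp ++ "." ++ x.2)).foldl PySem.Set.add s := by
  induction l generalizing s with
  | nil => rfl
  | cons y ys ih =>
    simp only [List.foldl_cons, stepA, List.filter_cons]
    by_cases he : PySem.Str.endswith y x.1
    · rw [if_pos ⟨hx, he⟩, if_pos he]
      simp only [List.map_cons, List.foldl_cons]
      exact ih _
    · rw [if_neg (by tauto), if_neg (by simp [hx]), if_neg (by simp [hx]),
        if_neg (by simpa using he)]
      exact ih _

-- A's inner fold over the imports is a fold of Set.add over the invocation's candidates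
theorem inner_eq_cand (localImports : List String) (curClass : String) (superclass : Option String)
    (curMethods : List String) (h : localImports ≠ []) (x : String × String) (s : PySem.Set String) :
    localImports.foldl (stepA curClass superclass curMethods x) s =
    (cand localImports curClass superclass curMethods x).foldl PySem.Set.add s := by
  by_cases hx : x.1 = ""
  · obtain ⟨y, ys, rfl⟩ := List.exists_cons_of_ne_nil h
    unfold cand
    rw [if_neg (by simp [hx])]
    by_cases hm : x.2 ∈ curMethods
    · rw [if_pos hm]
      simp only [List.foldl_cons, stepA]
      rw [if_neg (by simp [hx]), if_pos ⟨hx, hm⟩]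
      exact foldl_const_add _ _ (fun s y => by
        simp only [stepA]
        rw [if_neg (by simp [hx]), if_pos ⟨hx, hm⟩]) s ys
    · rw [if_neg hm]
      cases superclass with
      | none => exact inner_id curClass curMethods x hx hm _ s
      | some sup =>
        simp only [List.foldl_cons, stepA]
        rw [if_neg (by simp [hx]), if_neg (by tauto), if_pos ⟨hx, by simp⟩]
        simp only [Option.getD_some]
        exact foldl_const_add _ _ (fun s y => by
          simp only [stepA]
          rw [if_neg (by simp [hx]), if_neg (by tauto), if_pos ⟨hx, by simp⟩]
          simp) s ys
  · unfold cand
    rw [if_pos hx]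
    exact inner_ne curClass superclass curMethods x hx localImports s

-- A's whole fold is a fold of Set.add over the flattened candidate stream
theorem a_fold_eq (localImports : List String) (curClass : String) (superclass : Option String)
    (curMethods : List String) (h : localImports ≠ []) (invocations : List (String × String))
    (acc : PySem.Set String) :
    invocations.foldl (fun s x => localImports.foldl (stepA curClass superclass curMethods x) s) acc =
    (invocations.flatMap (cand localImports curClass superclass curMethods)).foldl PySem.Set.add acc := by
  induction invocations generalizing acc with
  | nil => rfl
  | cons x xs ih =>
    simp only [List.foldl_cons, List.flatMap_cons, List.foldl_append]
    rw [inner_eq_cand localImports curClass superclass curMethods h x acc]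
    exact ih _

-- cache invariant: every memoized entry is the filter of the imports by its prefix
def CacheOk (localImports : List String) (m : PySem.Dict String (List String)) : Prop :=
  ∀ p ms, PySem.Dict.get? m p = some ms →
    ms = localImports.filter (fun imp => PySem.Str.endswith imp p)

-- one B step appends exactly the invocation's candidates and keeps the cache sound
theorem stepB_spec (localImports : List String) (curClass : String) (superclass : Option String)
    (curMethods : List String) (m : PySem.Dict String (List String)) (out : List String)
    (x : String × String) (hm : CacheOk localImports m) :
    ∃ m', stepB localImports curClass superclass curMethods (m, out) x =
      (m', out ++ cand localImports curClass superclass curMethods x) ∧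
      CacheOk localImports m' := by
  unfold stepB cand
  by_cases hx : x.1 = ""
  · by_cases hmem : x.2 ∈ curMethods
    · exact ⟨m, by simp [hx, hmem], hm⟩
    · cases superclass with
      | none => exact ⟨m, by simp [hx, hmem], hm⟩
      | some sup => exact ⟨m, by simp [hx, hmem], hm⟩
  · cases hg : PySem.Dict.get? m x.1 with
    | some ms =>
      have hms := hm x.1 ms hg
      subst hms
      exact ⟨m, by simp [hx], hm⟩
    | none =>
      refine ⟨PySem.Dict.insert m x.1
        (localImports.filter (fun imp => PySem.Str.endswith imp x.1)), by simp [hx], ?_⟩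
      intro p ps hp
      rw [PySem.Dict.get?_insert] at hp
      by_cases hpp : p = x.1
      · rw [if_pos hpp] at hp
        cases hp; rw [hpp]
      · rw [if_neg hpp] at hp
        exact hm p ps hp

-- B's fold appends exactly the candidate stream, for any accumulator with a sound cache
theorem b_fold_eq (localImports : List String) (curClass : String) (superclass : Option String)
    (curMethods : List String) (invocations : List (String × String))
    (m : PySem.Dict String (List String)) (out : List String) (hm : CacheOk localImports m) :
    (invocations.foldl (stepB localImports curClass superclass curMethods) (m, out)).2 =
    out ++ invocations.flatMap (cand localImports curClass superclass curMethods) := by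
  induction invocations generalizing m out with
  | nil => simp
  | cons x xs ih =>
    simp only [List.foldl_cons, List.flatMap_cons]
    obtain ⟨m', hstep, hm'⟩ := stepB_spec localImports curClass superclass curMethods m out x hm
    rw [hstep, ih m' _ hm']
    simp

theorem main_eq (localImports : List String) (invocations : List (String × String))
    (curClass : String) (superclass : Option String) (curMethods : List String) :
    completeInvocation localImports invocations curClass superclass curMethods =
    completeInvocation_alt localImports invocations curClass superclass curMethods := by
  unfold completeInvocation completeInvocation_alt
  by_cases h : localImports = []
  · subst h
    rw [if_pos rfl]
    induction invocations with
    | nil => rfl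
    | cons x xs ih => simp
  · rw [if_neg h]
    show invocations.foldl (fun s x => localImports.foldl (stepA curClass superclass curMethods x) s)
        PySem.Set.empty = _
    rw [a_fold_eq localImports curClass superclass curMethods h invocations PySem.Set.empty,
      b_fold_eq localImports curClass superclass curMethods invocations PySem.Dict.empty []
        (by intro p ms hp; simp [PySem.Dict.get?_empty] at hp)]
    rw [List.nil_append, PySem.Set.ofList_eq_foldl]
    rfl

-- ===== VERDICT =====
theorem completeInvocation_spec : Claim_equal_completeInvocation := by
  intro li inv cc sup cm _
  exact main_eq li inv cc sup cm
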